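-- pv_equiv track=rewrite | github.com/moskalev1976/pythonProject | less 3/less 05.py | sum_nums
-- ===== SOURCE A (Python) =====
-- def sum_nums(nums_str, stop):
--     nums_list = nums_str.split(' ')
--     sum_list = 0
--     for i in nums_list:
--         if i == stop:
--             break
--         sum_list += int(i)
--     return sum_list
-- ===== SOURCE B (Python) =====
-- def sum_nums(nums_str, stop):
--     toks = nums_str.split(' ')
--     prefix = toks[:toks.index(stop)] if stop in toks else toks
--     return sum(int(x) for x in prefix)
-- ===== Notes on version B (the rewrite author's own statement) =====
-- stated objective: idiomatic
-- what changed: Replaces the fused accumulate-with-break loop by a two-stage pipeline: locate the stop token (membership test + index, slicing off the prefix) and then sum the parsed prefix with sum(); no explicit accumulator or break. Pre_ excludes only inputs where int() raises ValueError on a token before the stop token, where both A and B raise.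
import Mathlib
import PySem

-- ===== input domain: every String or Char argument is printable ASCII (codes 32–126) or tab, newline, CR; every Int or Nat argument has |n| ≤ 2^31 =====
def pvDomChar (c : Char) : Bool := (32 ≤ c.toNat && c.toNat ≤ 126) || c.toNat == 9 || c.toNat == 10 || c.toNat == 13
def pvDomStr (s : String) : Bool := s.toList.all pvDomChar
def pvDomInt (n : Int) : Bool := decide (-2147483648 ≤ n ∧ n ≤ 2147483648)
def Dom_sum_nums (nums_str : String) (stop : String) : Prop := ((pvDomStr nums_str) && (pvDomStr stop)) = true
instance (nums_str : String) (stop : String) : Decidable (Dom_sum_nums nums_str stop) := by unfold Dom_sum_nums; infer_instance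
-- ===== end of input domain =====

-- B is the same task as a two-stage pipeline (find the stop token, slice the prefix, sum it)
-- instead of A's fused accumulate-with-break loop; objective: idiomatic. Same behaviour on Pre_.

-- ===== PORT A =====
-- the for-loop with break and accumulator; int(i) → (ofStr? i).getD 0 (none = ValueError, excluded by Pre_)
def sumNumsLoopA (ts : List String) (stop : String) (acc : Int) : Int :=
  match ts with
  | [] => acc
  | t :: ts' => if t == stop then acc else sumNumsLoopA ts' stop (acc + (PySem.Int.ofStr? t).getD 0)

def sum_nums (nums_str : String) (stop : String) : Int :=
  sumNumsLoopA ((PySem.Str.split? nums_str " ").getD []) stop 0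

-- ===== PORT B =====
def sum_nums_alt (nums_str : String) (stop : String) : Int :=
  let toks := (PySem.Str.split? nums_str " ").getD []
  -- toks[:toks.index(stop)] if stop in toks else toks; the index is nonnegative so the slice is 'take'
  let pref := match PySem.List.index? toks stop with
    | some i => toks.take i
    | none => toks
  -- sum(int(x) for x in prefix); int(x) → (ofStr? x).getD 0 (none = ValueError, excluded by Pre_)
  (pref.map (fun x => (PySem.Int.ofStr? x).getD 0)).sum

-- ===== PRECONDITION & SPEC =====
-- Pre_ excludes exactly the inputs where Python's int() raises ValueError: some token before the
-- first stop token does not parse as an int (e.g. the empty token of "" or of consecutive spaces).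
def Pre_sum_nums (nums_str : String) (stop : String) : Prop :=
  ∀ t ∈ ((PySem.Str.split? nums_str " ").getD []).takeWhile (fun t => !(t == stop)),
    (PySem.Int.ofStr? t).isSome
instance (nums_str : String) (stop : String) : Decidable (Pre_sum_nums nums_str stop) := by
  unfold Pre_sum_nums; infer_instance
def pvWitness_sum_nums : String × String := ("1 2 x 3", "x")

def Spec_sum_nums (nums_str : String) (stop : String) (out : Int) : Prop := out = sum_nums_alt nums_str stop
instance (nums_str : String) (stop : String) (out : Int) : Decidable (Spec_sum_nums nums_str stop out) := by unfold Spec_sum_nums; infer_instance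

-- ===== CLAIM (what is proved, stated in full; the proofs are below) =====
def Claim_equal_sum_nums : Prop := ∀ (nums_str : String) (stop : String), Dom_sum_nums nums_str stop → Pre_sum_nums nums_str stop → Spec_sum_nums nums_str stop (sum_nums nums_str stop)

-- ===== LEMMAS AND PROOFS =====

-- B's prefix (slice up to the first index of stop, or the whole list) is takeWhile (≠ stop)
theorem prefix_eq_takeWhile (ts : List String) (stop : String) :
    (match PySem.List.index? ts stop with
      | some i => ts.take i
      | none => ts) = ts.takeWhile (fun t => !(t == stop)) := by
  induction ts with
  | nil => simp [PySem.List.index?]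
  | cons t ts' ih =>
    by_cases h : t = stop
    · subst h; rw [PySem.List.index?_cons_self]; simp
    · rw [PySem.List.index?_cons_of_ne ts' h]
      cases hidx : PySem.List.index? ts' stop with
      | none => rw [hidx] at ih; simpa [h] using ih
      | some i => rw [hidx] at ih; simpa [List.takeWhile_cons, h] using ih

-- A's loop equals acc plus the sum of the parsed takeWhile-prefix
theorem loopA_eq (ts : List String) (stop : String) (acc : Int) :
    sumNumsLoopA ts stop acc =
      acc + ((ts.takeWhile (fun t => !(t == stop))).map
              (fun x => (PySem.Int.ofStr? x).getD 0)).sum := by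
  induction ts generalizing acc with
  | nil => simp [sumNumsLoopA]
  | cons t ts' ih =>
    by_cases h : t = stop
    · subst h; simp [sumNumsLoopA, List.takeWhile]
    · simp only [sumNumsLoopA, beq_iff_eq, if_neg h]
      rw [ih]
      simp [h]
      ring

-- ===== VERDICT (by name: the statement is the Claim_ definition above) =====
theorem sum_nums_spec : Claim_equal_sum_nums := by
  intro nums_str stop _ _
  unfold Spec_sum_nums sum_nums sum_nums_alt
  rw [loopA_eq]
  simp only []
  rw [prefix_eq_takeWhile]
  ring
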